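-- pv_equiv track=rewrite | github.com/rakitaj/daily-programmer | challenge335/consecutive_distance.py | find_consecutive_distance
-- ===== SOURCE A (Python) =====
-- def find_consecutive_distance(row):
--     total_distance = 0
--     sep = 1
--     done_pairs = list()
--     for i in range(0, len(row)):
--         for j in range(i + 1, len(row)):
--             pair = (min(i, j), max(i, j))
--             if abs(row[i] - row[j]) == 1 and pair not in done_pairs:
--                 distance = j - i
--                 total_distance += distance
--                 done_pairs.append(pair)
--     return total_distance
-- ===== SOURCE B (Python) =====
-- def find_consecutive_distance(row):
--     # One pass: for each value keep (count, sum of indices) of its earlier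
--     # occurrences; each new element at j adds c*j - s for neighbours j's value +/-1.
--     total_distance = 0
--     stats = {}
--     for j, v in enumerate(row):
--         for w in (v - 1, v + 1):
--             if w in stats:
--                 c, s = stats[w]
--                 total_distance += c * j - s
--         c, s = stats.get(v, (0, 0))
--         stats[v] = (c + 1, s + j)
--     return total_distance
-- ===== Notes on version B (the rewrite author's own statement) =====
-- stated objective: faster
-- what changed: Replaced the nested index loops with a done_pairs membership scan by a single pass that keeps, per value, the count and index-sum of earlier occurrences and adds c*j - s for the two neighbouring values of each new element.
import Mathlib
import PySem

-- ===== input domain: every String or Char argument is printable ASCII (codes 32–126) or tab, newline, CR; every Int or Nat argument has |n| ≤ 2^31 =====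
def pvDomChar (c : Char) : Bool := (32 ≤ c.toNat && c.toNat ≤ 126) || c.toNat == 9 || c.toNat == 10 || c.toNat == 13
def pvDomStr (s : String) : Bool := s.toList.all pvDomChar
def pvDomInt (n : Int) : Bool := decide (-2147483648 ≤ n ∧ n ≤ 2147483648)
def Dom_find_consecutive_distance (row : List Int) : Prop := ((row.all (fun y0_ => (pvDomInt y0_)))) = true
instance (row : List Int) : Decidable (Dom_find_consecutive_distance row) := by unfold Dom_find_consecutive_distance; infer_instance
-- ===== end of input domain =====

-- B replaces A's nested index loops (with their done_pairs list scan) by a single pass that keeps,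
-- per value, the count and index-sum of earlier occurrences; measured faster (asymptotic).

-- ===== PORT A =====
def find_consecutive_distance (row : List Int) : Int :=
  let n : Int := (row.length : Int)
  let st :=
    (PySem.List.pyRange 0 n 1).foldl (fun (acc : Int × List (Int × Int)) i =>
      (PySem.List.pyRange (i + 1) n 1).foldl (fun (acc2 : Int × List (Int × Int)) j =>
        let pair := (min i j, max i j)
        if |PySem.List.pyGetD row i 0 - PySem.List.pyGetD row j 0| = 1 ∧ pair ∉ acc2.2 then
          (acc2.1 + (j - i), acc2.2 ++ [pair])
        else acc2) acc) (0, [])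
  st.1

-- ===== PORT B =====
def find_consecutive_distance_alt (row : List Int) : Int :=
  let st :=
    (PySem.List.enumerate row 0).foldl
      (fun (acc : Int × PySem.Dict Int (Int × Int)) jv =>
        let j := jv.1
        let v := jv.2
        let t :=
          [v - 1, v + 1].foldl (fun t w =>
            match acc.2.get? w with
            | some cs => t + (cs.1 * j - cs.2)
            | none => t) acc.1
        let cs := acc.2.getD v (0, 0)
        (t, acc.2.insert v (cs.1 + 1, cs.2 + j)))
      (0, PySem.Dict.empty)
  st.1

-- ===== PRECONDITION & SPEC =====
def Spec_find_consecutive_distance (row : List Int) (out : Int) : Prop := out = find_consecutive_distance_alt row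
instance (row : List Int) (out : Int) : Decidable (Spec_find_consecutive_distance row out) := by unfold Spec_find_consecutive_distance; infer_instance

-- ===== CLAIM (what is proved, stated in full; the proofs are below) =====
def Claim_equal_find_consecutive_distance : Prop := ∀ (row : List Int), Dom_find_consecutive_distance row → Spec_find_consecutive_distance row (find_consecutive_distance row)

-- ===== LEMMAS AND PROOFS =====

-- contribution of the pair (i, j), i < j, to the total
def pvDD (row : List Int) (i j : Nat) : Int :=
  if |row.getD i 0 - row.getD j 0| = 1 then (j : Int) - (i : Int) else 0

-- the common specification: sum of pvDD over all pairs i < j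
def pvS (row : List Int) : Int :=
  ∑ j ∈ Finset.range row.length, ∑ i ∈ Finset.range j, pvDD row i j

-- A's outer-loop view of the same sum: everything paired with a fixed left index i
def pvG (row : List Int) (i : Nat) : Int :=
  ∑ j ∈ Finset.range row.length, if i < j then pvDD row i j else 0

def pvCnt (l : List Int) (v : Int) : Int :=
  ∑ i ∈ Finset.range l.length, if l.getD i 0 = v then (1 : Int) else 0

def pvSidx (l : List Int) (v : Int) : Int :=
  ∑ i ∈ Finset.range l.length, if l.getD i 0 = v then (i : Int) else 0

-- what appending one element x at index l.length adds to pvS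
def pvContrib (l : List Int) (x : Int) : Int :=
  ∑ i ∈ Finset.range l.length,
    if |l.getD i 0 - x| = 1 then ((l.length : Int) - (i : Int)) else 0

-- A's inner-loop body, named for the proofs
def pvStep2 (row : List Int) (i : Int) (acc2 : Int × List (Int × Int)) (j : Int) :
    Int × List (Int × Int) :=
  let pair := (min i j, max i j)
  if |PySem.List.pyGetD row i 0 - PySem.List.pyGetD row j 0| = 1 ∧ pair ∉ acc2.2 then
    (acc2.1 + (j - i), acc2.2 ++ [pair])
  else acc2

theorem pv_enumerate_append_singleton (l : List Int) (x : Int) (s : Int) :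
    PySem.List.enumerate (l ++ [x]) s = PySem.List.enumerate l s ++ [(s + l.length, x)] := by
  induction l generalizing s with
  | nil => simp [PySem.List.enumerate_nil, PySem.List.enumerate_cons]
  | cons a t ih =>
    simp [PySem.List.enumerate_cons, ih (s + 1)]
    ring_nf

theorem pv_cnt_snoc (l : List Int) (x v : Int) :
    pvCnt (l ++ [x]) v = pvCnt l v + (if v = x then 1 else 0) := by
  unfold pvCnt
  rw [List.length_append, List.length_singleton, Finset.sum_range_succ]
  congr 1
  · exact Finset.sum_congr rfl fun i hi => by
      rw [List.getD_append l [x] 0 i (Finset.mem_range.mp hi)]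
  · simp [List.getD, eq_comm]

theorem pv_sidx_snoc (l : List Int) (x v : Int) :
    pvSidx (l ++ [x]) v = pvSidx l v + (if v = x then (l.length : Int) else 0) := by
  unfold pvSidx
  rw [List.length_append, List.length_singleton, Finset.sum_range_succ]
  congr 1
  · exact Finset.sum_congr rfl fun i hi => by
      rw [List.getD_append l [x] 0 i (Finset.mem_range.mp hi)]
  · simp [List.getD, eq_comm]

-- B's per-step formula: new pairs ending at index l.length contribute count·len − index-sum
theorem pv_contrib_eq (l : List Int) (x : Int) :
    pvContrib l x =
      (pvCnt l (x - 1) * (l.length : Int) - pvSidx l (x - 1))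
      + (pvCnt l (x + 1) * (l.length : Int) - pvSidx l (x + 1)) := by
  unfold pvContrib pvCnt pvSidx
  rw [Finset.sum_mul, Finset.sum_mul, ← Finset.sum_sub_distrib, ← Finset.sum_sub_distrib,
    ← Finset.sum_add_distrib]
  apply Finset.sum_congr rfl
  intro i _
  have habs : |l.getD i 0 - x| = 1 ↔ (l.getD i 0 = x - 1 ∨ l.getD i 0 = x + 1) := by
    rw [abs_eq (by norm_num : (0:Int) ≤ 1)]; omega
  simp only [habs]
  split_ifs <;> omega

theorem pv_S_snoc (l : List Int) (x : Int) :
    pvS (l ++ [x]) = pvS l + pvContrib l x := by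
  unfold pvS pvContrib
  rw [List.length_append, List.length_singleton, Finset.sum_range_succ]
  congr 1
  · apply Finset.sum_congr rfl
    intro j hj
    apply Finset.sum_congr rfl
    intro i hi
    have hj' := Finset.mem_range.mp hj
    have hi' := Finset.mem_range.mp hi
    unfold pvDD
    rw [List.getD_append l [x] 0 i (by omega), List.getD_append l [x] 0 j (by omega)]
  · apply Finset.sum_congr rfl
    intro i hi
    have hi' := Finset.mem_range.mp hi
    unfold pvDD
    rw [List.getD_append l [x] 0 i (by omega)]
    simp [List.getD]

-- ---- B equals pvS: the one-pass fold maintains (pvS of prefix, per-value (count, index-sum)) ----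

theorem pv_alt_invariant (l : List Int) :
    ∃ d : PySem.Dict Int (Int × Int),
      ((PySem.List.enumerate l 0).foldl
        (fun (acc : Int × PySem.Dict Int (Int × Int)) jv =>
          let j := jv.1
          let v := jv.2
          let t :=
            [v - 1, v + 1].foldl (fun t w =>
              match acc.2.get? w with
              | some cs => t + (cs.1 * j - cs.2)
              | none => t) acc.1
          let cs := acc.2.getD v (0, 0)
          (t, acc.2.insert v (cs.1 + 1, cs.2 + j)))
        (0, PySem.Dict.empty)) = (pvS l, d)
      ∧ ∀ v : Int, d.getD v (0, 0) = (pvCnt l v, pvSidx l v) := by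
  induction l using List.reverseRecOn with
  | nil =>
    refine ⟨PySem.Dict.empty, ?_, ?_⟩
    · simp [PySem.List.enumerate_nil, pvS]
    · intro v
      simp [PySem.Dict.getD_empty, pvCnt, pvSidx]
  | append_singleton l x ih =>
    obtain ⟨d, hfold, hinv⟩ := ih
    have hone : ∀ w : Int, (match d.get? w with
        | some cs => (cs.1 * (l.length : Int) - cs.2)
        | none => (0:Int)) = pvCnt l w * (l.length : Int) - pvSidx l w := by
      intro w
      cases hg : d.get? w with
      | some cs =>
        have := PySem.Dict.getD_of_get?_eq_some (d := d) (k := w) (d0 := ((0:Int),(0:Int))) hg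
        rw [hinv w] at this
        simp [← this]
      | none =>
        have := PySem.Dict.getD_of_get?_eq_none (d := d) (k := w) (d0 := ((0:Int),(0:Int))) hg
        rw [hinv w] at this
        rw [Prod.ext_iff] at this
        simp only [] at this
        rw [this.1, this.2]
        ring
    refine ⟨d.insert x (pvCnt l x + 1, pvSidx l x + (l.length : Int)), ?_, ?_⟩
    · rw [pv_enumerate_append_singleton l x 0, List.foldl_append, hfold]
      simp only [List.foldl, zero_add]
      have e1 := hone (x - 1)
      have e2 := hone (x + 1)
      have hsum : pvS (l ++ [x]) = pvS l
          + (pvCnt l (x - 1) * (l.length : Int) - pvSidx l (x - 1))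
          + (pvCnt l (x + 1) * (l.length : Int) - pvSidx l (x + 1)) := by
        rw [pv_S_snoc, pv_contrib_eq]; ring
      rw [hinv x, hsum]
      cases hg1 : d.get? (x - 1) <;> cases hg2 : d.get? (x + 1) <;>
        simp only [hg1, hg2] at e1 e2 ⊢ <;>
        rw [← e1, ← e2] <;> ring_nf
    · intro v
      rw [PySem.Dict.getD_insert, pv_cnt_snoc, pv_sidx_snoc, hinv v]
      split_ifs with h
      · rw [h]
      · simp

theorem pv_alt_eq_S (row : List Int) : find_consecutive_distance_alt row = pvS row := by
  obtain ⟨d, hfold, -⟩ := pv_alt_invariant row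
  simp only [find_consecutive_distance_alt, hfold]

-- ---- A equals pvS ----

-- A's inner loop: the done_pairs test never fires (each pair is visited once), so it just
-- adds the distances for left index i and appends the matched pairs (all with first component i)
theorem pv_inner (row : List Int) (i : Int) :
    ∀ (js : List Int) (t : Int) (dp : List (Int × Int)),
      js.Nodup → (∀ j ∈ js, i < j) →
      (∀ p ∈ dp, p.1 < i ∨ (p.1 = i ∧ p.2 ∉ js)) →
      js.foldl (pvStep2 row i) (t, dp) =
        (t + (js.map (fun j =>
            if |PySem.List.pyGetD row i 0 - PySem.List.pyGetD row j 0| = 1 then j - i else 0)).sum,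
         dp ++ (js.filter (fun j =>
            decide (|PySem.List.pyGetD row i 0 - PySem.List.pyGetD row j 0| = 1))).map
            (fun j => (i, j))) := by
  intro js
  induction js with
  | nil => intro t dp _ _ _; simp
  | cons j rest ih =>
    intro t dp hnd hlt hdp
    have hij : i < j := hlt j (List.mem_cons_self)
    have hmin : min i j = i := min_eq_left hij.le
    have hmax : max i j = j := max_eq_right hij.le
    have hnotmem : (min i j, max i j) ∉ dp := by
      rw [hmin, hmax]
      intro hmem
      rcases hdp _ hmem with h | ⟨_, h2⟩
      · exact absurd h (by simp)
      · exact h2 List.mem_cons_self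
    rw [List.foldl_cons]
    by_cases hc : |PySem.List.pyGetD row i 0 - PySem.List.pyGetD row j 0| = 1
    · have hstep : pvStep2 row i (t, dp) j = (t + (j - i), dp ++ [(i, j)]) := by
        unfold pvStep2
        rw [if_pos ⟨hc, hnotmem⟩, hmin, hmax]
      rw [hstep, ih (t + (j - i)) (dp ++ [(i, j)]) hnd.of_cons
          (fun j' hj' => hlt j' (List.mem_cons_of_mem _ hj'))
          ?_]
      · simp only [List.map_cons, List.sum_cons, List.filter_cons, hc, decide_true,
          List.map_cons, if_pos trivial]
        rw [Prod.ext_iff]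
        exact ⟨by ring, by simp⟩
      · intro p hp
        rcases List.mem_append.mp hp with h | h
        · rcases hdp p h with h1 | ⟨h1, h2⟩
          · exact Or.inl h1
          · exact Or.inr ⟨h1, fun hm => h2 (List.mem_cons_of_mem _ hm)⟩
        · simp at h
          subst h
          exact Or.inr ⟨rfl, (List.nodup_cons.mp hnd).1⟩
    · have hstep : pvStep2 row i (t, dp) j = (t, dp) := by
        unfold pvStep2
        rw [if_neg (by tauto)]
      rw [hstep, ih t dp hnd.of_cons
          (fun j' hj' => hlt j' (List.mem_cons_of_mem _ hj'))
          (fun p hp => by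
            rcases hdp p hp with h1 | ⟨h1, h2⟩
            · exact Or.inl h1
            · exact Or.inr ⟨h1, fun hm => h2 (List.mem_cons_of_mem _ hm)⟩)]
      simp [hc]

theorem pv_inner_sum (row : List Int) (m : Nat) (hm : m < row.length) :
    ((PySem.List.pyRange ((m : Int) + 1) (row.length : Int) 1).map (fun j =>
        if |PySem.List.pyGetD row (m : Int) 0 - PySem.List.pyGetD row j 0| = 1 then j - (m : Int)
        else 0)).sum = pvG row m := by
  rw [PySem.List.pyRange_one, List.map_map]
  have hK : ((row.length : Int) - ((m : Int) + 1)).toNat = row.length - (m + 1) := by omega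
  rw [hK]
  have hlist : ∀ (K : Nat) (g : Nat → Int), ((List.range K).map g).sum = ∑ k ∈ Finset.range K, g k :=
    fun K g => rfl
  rw [hlist]
  have hfilter : (Finset.range row.length).filter (fun j => m < j) = Finset.Ico (m + 1) row.length := by
    ext j; simp; omega
  unfold pvG
  rw [← Finset.sum_filter, hfilter, Finset.sum_Ico_eq_sum_range]
  apply Finset.sum_congr rfl
  intro k hk
  have hcast : (m : Int) + 1 + (k : Int) = ((m + 1 + k : Nat) : Int) := by push_cast; ring
  simp only [Function.comp]
  rw [hcast, PySem.List.pyGetD_natCast, PySem.List.pyGetD_natCast]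
  unfold pvDD
  split_ifs with h
  · push_cast; ring
  · rfl

-- A's outer loop: after processing left indices 0..m-1 the total is ∑ pvG and every recorded
-- pair has first component < m
theorem pv_outer (row : List Int) :
    ∀ m : Nat, m ≤ row.length →
      ∃ dp : List (Int × Int),
        ((List.range m).map (fun k : Nat => (k : Int))).foldl
            (fun acc i =>
              (PySem.List.pyRange (i + 1) (row.length : Int) 1).foldl (pvStep2 row i) acc)
            (0, []) = (∑ i ∈ Finset.range m, pvG row i, dp)
        ∧ ∀ p ∈ dp, p.1 < (m : Int) := by
  intro m
  induction m with
  | zero => intro _; exact ⟨[], by simp, by simp⟩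
  | succ m ih =>
    intro hm
    obtain ⟨dp, hfold, hdp⟩ := ih (by omega)
    refine ⟨dp ++ ((PySem.List.pyRange ((m : Int) + 1) (row.length : Int) 1).filter (fun j =>
        decide (|PySem.List.pyGetD row (m : Int) 0 - PySem.List.pyGetD row j 0| = 1))).map
        (fun j => ((m : Int), j)), ?_, ?_⟩
    · rw [List.range_succ]
      rw [List.map_append, List.foldl_append, hfold]
      simp only [List.map_cons, List.map_nil, List.foldl_cons, List.foldl_nil]
      rw [pv_inner row (m : Int) _ _ _ (PySem.List.nodup_pyRange_one _ _)
        (fun j hj => by have := PySem.List.mem_pyRange_one.mp hj; omega)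
        (fun p hp => Or.inl (hdp p hp))]
      rw [pv_inner_sum row m (by omega), Finset.sum_range_succ]
    · intro p hp
      rcases List.mem_append.mp hp with h | h
      · have := hdp p h; push_cast; omega
      · obtain ⟨j, _, rfl⟩ := List.mem_map.mp h
        push_cast; omega

-- exchanging the summation order turns A's left-index view into pvS
theorem pv_G_sum (row : List Int) :
    ∑ i ∈ Finset.range row.length, pvG row i = pvS row := by
  unfold pvG pvS
  rw [Finset.sum_comm]
  apply Finset.sum_congr rfl
  intro j hj
  have hj' := Finset.mem_range.mp hj
  have hfilter : (Finset.range row.length).filter (fun i => i < j) = Finset.range j := by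
    ext i; simp; omega
  rw [← Finset.sum_filter, hfilter]

theorem pv_A_eq_S (row : List Int) : find_consecutive_distance row = pvS row := by
  obtain ⟨dp, hfold, -⟩ := pv_outer row row.length (le_refl _)
  have hshow : find_consecutive_distance row =
      (((List.range row.length).map (fun k : Nat => (k : Int))).foldl
        (fun acc i =>
          (PySem.List.pyRange (i + 1) (row.length : Int) 1).foldl (pvStep2 row i) acc)
        (0, [])).1 := by
    simp only [find_consecutive_distance]
    rw [PySem.List.pyRange_zero_nat row.length]
    rfl
  rw [hshow, hfold, pv_G_sum]

-- ===== VERDICT (by name: the statement is the Claim_ definition above) =====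
theorem find_consecutive_distance_spec : Claim_equal_find_consecutive_distance := by
  intro row _
  unfold Spec_find_consecutive_distance
  rw [pv_A_eq_S, pv_alt_eq_S]
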